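-- pv_equiv track=rewrite | github.com/jayanth920/dsa | Dynamic Programming/#1140 Stone Game II/main.py | solve
-- ===== SOURCE A (Python) =====
-- def solve(piles):
--     # EXCELLENT
--     dp = {}  # Memoization dictionary
--
--     def dfs(alice, i, M):
--         if i == len(piles):
--             return 0
--         if (alice, i, M) in dp:
--             return dp[(alice, i, M)]
--
--         res = 0 if alice else float("inf")
--         total = 0
--
--         for X in range(1, 2 * M + 1):
--             if i + X > len(piles):
--                 break
--             total += piles[i + X - 1]
--
--             if alice:
--                 res = max(res, total + dfs(not alice, i + X, max(M, X)))
--             else: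
--                 res = min(res, dfs(not alice, i + X, max(M, X)))
--
--         dp[(alice, i, M)] = res
--         return res
--
--     return dfs(True, 0, 1)
-- ===== SOURCE B (Python) =====
-- def solve(piles):
--     # Bottom-up tabulation: two (n+1)x(n+1) tables (Alice rows / Bob rows) built
--     # from the end of the pile list, with precomputed suffix sums replacing the
--     # running total. No recursion, no memo dictionary.
--     n = len(piles)
--     if n == 0:
--         return 0
--     suf = [0] * (n + 1)
--     for j in range(n - 1, -1, -1):
--         suf[j] = piles[j] + suf[j + 1]
--     rows_t = [[0] * (n + 1)]  # rows_t[k] is Alice's row for index i+1+k (last row = index n)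
--     rows_u = [[0] * (n + 1)]  # same for Bob
--     for i in range(n - 1, -1, -1):
--         row_t = []
--         row_u = []
--         for M in range(n + 1):
--             best = 0
--             worst = None
--             for X in range(1, min(2 * M, n - i) + 1):
--                 Mp = max(M, X)
--                 gain = suf[i] - suf[i + X]
--                 best = max(best, gain + rows_u[X - 1][Mp])
--                 vt = rows_t[X - 1][Mp]
--                 worst = vt if worst is None else min(worst, vt)
--             row_t.append(best)
--             row_u.append(worst if worst is not None else 0)
--         rows_t.insert(0, row_t)
--         rows_u.insert(0, row_u)
--     return rows_t[0][1]
-- ===== Notes on version B (the rewrite author's own statement) =====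
-- stated objective: alternative
-- what changed: Replaces the top-down memoized two-player recursion (dict keyed by (alice,i,M)) with an explicit bottom-up tabulation: suffix sums are precomputed and two (n+1)x(n+1) tables (Alice/Bob rows) are built iteratively from the end of the list, with no recursion and no memo dictionary.
import Mathlib
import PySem

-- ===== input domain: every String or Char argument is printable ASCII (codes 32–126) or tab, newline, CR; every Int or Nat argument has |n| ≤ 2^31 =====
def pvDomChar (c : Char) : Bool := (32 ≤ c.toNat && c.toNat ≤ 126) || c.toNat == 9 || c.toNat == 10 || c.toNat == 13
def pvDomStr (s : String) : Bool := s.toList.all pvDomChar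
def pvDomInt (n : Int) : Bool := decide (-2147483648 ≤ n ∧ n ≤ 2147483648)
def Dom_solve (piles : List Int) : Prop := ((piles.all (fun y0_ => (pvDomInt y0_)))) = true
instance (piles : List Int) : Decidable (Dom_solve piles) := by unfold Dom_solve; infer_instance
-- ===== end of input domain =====

-- B replaces A's top-down memoized two-player recursion by a bottom-up tabulation with
-- precomputed suffix sums (alternative decomposition, similar cost); return values are
-- proved identical on every integer list.

-- ===== PORT A =====
-- A's inner `for X in range(1, 2*M+1)` loop with its break; `res : Option Int` carries
-- Python's `res`: `none` encodes the float("inf") Bob starts from (whenever Python's dfs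
-- returns an int, at least one iteration ran, so the result is `some`); the memo dict dp
-- only caches the pure value of dfs and is omitted, the returned values are identical.
def loopA (piles : List Int) (alice : Bool) (i M : Nat)
    (dfs : Bool → Nat → Nat → Int) : Nat → Nat → Option Int → Int → Option Int
  | _, 0, res, _ => res
  | X, Nat.succ c, res, total =>
    if piles.length < i + X then res          -- `if i + X > len(piles): break`
    else
      let total' := total + piles.getD (i + X - 1) 0   -- index i+X-1 is always in range here
      let r := dfs (!alice) (i + X) (max M X)
      let res' : Option Int :=
        match res with
        | none => some (if alice then total' + r else r)
        | some cur => some (if alice then max cur (total' + r) else min cur r)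
      loopA piles alice i M dfs (X + 1) c res' total'

-- fuel = recursion depth bound; every call site supplies enough fuel (i increases by ≥ 1
-- per nested call), so the 0-fuel branch is never the value Python computes.
def dfsA (piles : List Int) (alice : Bool) (i M : Nat) : Nat → Int
  | 0 => 0
  | Nat.succ f =>
    if i = piles.length then 0
    else
      (loopA piles alice i M (fun a j m => dfsA piles a j m f)
        1 (2 * M) (if alice then some 0 else none) 0).getD 0

def solve (piles : List Int) : Int := dfsA piles true 0 1 (piles.length + 1)

-- ===== PORT B =====
-- suffix sums: suf[j] = piles[j] + suf[j+1], built right-to-left as in Source B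
def sufB (piles : List Int) : List Int :=
  piles.foldr (fun p acc => (p + acc.headD 0) :: acc) [0]

-- Source B's innermost X-loop: one left fold over X = 1 .. min(2M, n-i), state (best, worst)
def innerB (sufL : List Int) (rowsT rowsU : List (List Int)) (n i M : Nat) : Int × Option Int :=
  (List.range' 1 (min (2 * M) (n - i))).foldl
    (fun bw X =>
      let Mp := max M X
      let gain := sufL.getD i 0 - sufL.getD (i + X) 0
      let vu := (rowsU.getD (X - 1) []).getD Mp 0
      let vt := (rowsT.getD (X - 1) []).getD Mp 0
      (max bw.1 (gain + vu),
       some (match bw.2 with | none => vt | some c => min c vt)))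
    (0, none)

-- one iteration of Source B's outer `for i in range(n-1,-1,-1)` loop: build both rows for
-- index i (M = 0..n) and prepend them (Source B's insert(0, ·))
def stepB (sufL : List Int) (n : Nat) (i : Nat)
    (rows : List (List Int) × List (List Int)) : List (List Int) × List (List Int) :=
  let rowPairs := (List.range (n + 1)).map (fun M => innerB sufL rows.1 rows.2 n i M)
  ((rowPairs.map (fun p => p.1)) :: rows.1,
   (rowPairs.map (fun p => p.2.getD 0)) :: rows.2)

def solve_alt (piles : List Int) : Int :=
  let n := piles.length
  if n = 0 then 0
  else
    let sufL := sufB piles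
    -- foldr over List.range n visits i = n-1, …, 0: the descending Python loop
    let rows := (List.range n).foldr (stepB sufL n)
      ([List.replicate (n + 1) 0], [List.replicate (n + 1) 0])
    (rows.1.getD 0 []).getD 1 0

-- ===== PRECONDITION & SPEC =====
def Spec_solve (piles : List Int) (out : Int) : Prop := out = solve_alt piles
instance (piles : List Int) (out : Int) : Decidable (Spec_solve piles out) := by unfold Spec_solve; infer_instance

-- ===== CLAIM (what is proved, stated in full; the proofs are below) =====
def Claim_equal_solve : Prop := ∀ (piles : List Int), Dom_solve piles → Spec_solve piles (solve piles)

-- ===== LEMMAS AND PROOFS =====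

-- mathematical suffix sum
def sufv (piles : List Int) (j : Nat) : Int := ((piles.drop j).sum)

-- canonical value of A's dfs (fuel piles.length - i always suffices, proved below)
def Fv (piles : List Int) (a : Bool) (i M : Nat) : Int := dfsA piles a i M (piles.length - i)

def maxFold (b : Int) (l : List Int) : Int := l.foldl max b

def optMin (w : Option Int) (l : List Int) : Option Int :=
  l.foldl (fun w v => some (match w with | none => v | some c => min c v)) w

-- the values A's Alice loop maximizes over / Bob loop minimizes over
def valsT (piles : List Int) (i M X cnt : Nat) : List Int :=
  (List.range' X cnt).map (fun Y => (sufv piles i - sufv piles (i + Y)) + Fv piles false (i + Y) (max M Y))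

def valsU (piles : List Int) (i M X cnt : Nat) : List Int :=
  (List.range' X cnt).map (fun Y => Fv piles true (i + Y) (max M Y))

theorem sufB_getD (piles : List Int) : ∀ j : Nat, (sufB piles).getD j 0 = sufv piles j := by
  induction piles with
  | nil => intro j; cases j <;> simp [sufB, sufv]
  | cons p rest ih =>
    intro j
    have hcons : sufB (p :: rest) = (p + (sufB rest).headD 0) :: sufB rest := rfl
    have hhead : (sufB rest).headD 0 = sufv rest 0 := by
      have h0 := ih 0
      cases h : sufB rest with
      | nil => rw [h] at h0; simpa using h0
      | cons a l => rw [h] at h0; simpa using h0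
    cases j with
    | zero => rw [hcons]; simp only [List.getD_cons_zero]; rw [hhead]; simp [sufv]
    | succ j => rw [hcons]; simpa [sufv] using ih j

theorem sufv_step (piles : List Int) (j : Nat) (hj : j < piles.length) :
    sufv piles j = piles.getD j 0 + sufv piles (j + 1) := by
  rw [sufv, List.drop_eq_getElem_cons hj, List.sum_cons, sufv, List.getD_eq_getElem _ _ hj]

theorem loopA_stop (piles : List Int) (alice : Bool) (i M : Nat) (dfs : Bool → Nat → Nat → Int)
    (X cnt : Nat) (res : Option Int) (total : Int) (h : piles.length < i + X) :
    loopA piles alice i M dfs X cnt res total = res := by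
  cases cnt <;> simp [loopA, h]

theorem loopA_true (piles : List Int) (i M : Nat) (dfs : Bool → Nat → Nat → Int)
    (hH : ∀ Y, 1 ≤ Y → i + Y ≤ piles.length → dfs false (i + Y) (max M Y) = Fv piles false (i + Y) (max M Y)) :
    ∀ cnt X (b : Int), 1 ≤ X →
      loopA piles true i M dfs X cnt (some b) (sufv piles i - sufv piles (i + X - 1))
        = some (maxFold b (valsT piles i M X (min cnt (piles.length + 1 - (i + X))))) := by
  intro cnt
  induction cnt with
  | zero => intro X b _; simp [loopA, valsT, maxFold]
  | succ c ih =>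
    intro X b hX
    by_cases hbr : piles.length < i + X
    · have : piles.length + 1 - (i + X) = 0 := by omega
      simp [loopA, hbr, this, valsT, maxFold]
    · have hle : i + X ≤ piles.length := by omega
      have hidx : i + X - 1 < piles.length := by omega
      have htot : sufv piles i - sufv piles (i + X - 1) + piles.getD (i + X - 1) 0
          = sufv piles i - sufv piles (i + X) := by
        have := sufv_step piles (i + X - 1) hidx
        have hx1 : i + X - 1 + 1 = i + X := by omega
        rw [hx1] at this; omega
      have hr := hH X hX hle
      have hrec := ih (X + 1) (max b ((sufv piles i - sufv piles (i + X)) + Fv piles false (i + X) (max M X))) (by omega)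
      rw [show i + (X + 1) - 1 = i + X from by omega] at hrec
      have hcnt : min (c + 1) (piles.length + 1 - (i + X)) = min c (piles.length + 1 - (i + X + 1)) + 1 := by omega
      simp only [loopA, if_neg hbr, Bool.not_true, if_true]
      rw [htot, hr, hrec, hcnt]
      simp [valsT, maxFold, List.range'_succ, Nat.add_assoc]

theorem loopA_false (piles : List Int) (i M : Nat) (dfs : Bool → Nat → Nat → Int)
    (hH : ∀ Y, 1 ≤ Y → i + Y ≤ piles.length → dfs true (i + Y) (max M Y) = Fv piles true (i + Y) (max M Y)) :
    ∀ cnt X (w : Option Int) (total : Int), 1 ≤ X →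
      loopA piles false i M dfs X cnt w total
        = optMin w (valsU piles i M X (min cnt (piles.length + 1 - (i + X)))) := by
  intro cnt
  induction cnt with
  | zero => intro X w total _; simp [loopA, valsU, optMin]
  | succ c ih =>
    intro X w total hX
    by_cases hbr : piles.length < i + X
    · have : piles.length + 1 - (i + X) = 0 := by omega
      simp [loopA, hbr, this, valsU, optMin]
    · have hle : i + X ≤ piles.length := by omega
      have hr := hH X hX hle
      have hcnt : min (c + 1) (piles.length + 1 - (i + X)) = min c (piles.length + 1 - (i + X + 1)) + 1 := by omega
      cases w <;>
      · simp only [loopA, if_neg hbr, Bool.not_false, Bool.false_eq_true, if_false]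
        rw [hr, ih (X + 1) _ _ (by omega), hcnt]
        simp [valsU, optMin, List.range'_succ, Nat.add_assoc]

theorem dfsA_ge (piles : List Int) (i : Nat) (hi : piles.length ≤ i) :
    ∀ (a : Bool) (M f : Nat), dfsA piles a i M f = 0 := by
  intro a M f
  cases f with
  | zero => simp [dfsA]
  | succ f =>
    by_cases h : i = piles.length
    · simp [dfsA, h]
    · have hlt : piles.length < i + 1 := by omega
      cases a
      · have hstop := loopA_stop piles false i M (fun a j m => dfsA piles a j m f) 1 (2 * M) none 0 hlt
        simp [dfsA, h, hstop]
      · have hstop := loopA_stop piles true i M (fun a j m => dfsA piles a j m f) 1 (2 * M) (some 0) 0 hlt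
        simp [dfsA, h, hstop]

theorem dfs_eq_F (piles : List Int) :
    ∀ d i, piles.length - i ≤ d → ∀ (a : Bool) (M f : Nat), piles.length - i ≤ f →
      dfsA piles a i M f = Fv piles a i M := by
  intro d
  induction d with
  | zero =>
    intro i hd a M f _
    have hi : piles.length ≤ i := by omega
    rw [dfsA_ge piles i hi, Fv, dfsA_ge piles i hi]
  | succ d ih =>
    intro i hd a M f hf
    by_cases hi : piles.length ≤ i
    · rw [dfsA_ge piles i hi, Fv, dfsA_ge piles i hi]
    · replace hi : i < piles.length := by omega
      obtain ⟨f', rfl⟩ : ∃ f', f = f' + 1 := ⟨f - 1, by omega⟩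
      have hn : piles.length - i = (piles.length - i - 1) + 1 := by omega
      have hne : ¬ i = piles.length := by omega
      have hHf' : ∀ (b : Bool) Y, 1 ≤ Y → i + Y ≤ piles.length →
          dfsA piles b (i + Y) (max M Y) f' = Fv piles b (i + Y) (max M Y) := by
        intro b Y hY hle
        exact ih (i + Y) (by omega) b (max M Y) f' (by omega)
      have hHn : ∀ (b : Bool) Y, 1 ≤ Y → i + Y ≤ piles.length →
          dfsA piles b (i + Y) (max M Y) (piles.length - i - 1) = Fv piles b (i + Y) (max M Y) := by
        intro b Y hY hle
        exact ih (i + Y) (by omega) b (max M Y) _ (by omega)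
      have h0 : sufv piles i - sufv piles (i + 1 - 1) = 0 := by
        have : i + 1 - 1 = i := by omega
        rw [this]; ring
      cases a with
      | true =>
        have hL1 := loopA_true piles i M (fun a j m => dfsA piles a j m f')
          (fun Y hY hle => hHf' false Y hY hle) (2 * M) 1 0 (by omega)
        have hL2 := loopA_true piles i M (fun a j m => dfsA piles a j m (piles.length - i - 1))
          (fun Y hY hle => hHn false Y hY hle) (2 * M) 1 0 (by omega)
        rw [h0] at hL1 hL2
        rw [Fv, hn]
        simp [dfsA, hne, hL1, hL2]
      | false =>
        have hL1 := loopA_false piles i M (fun a j m => dfsA piles a j m f')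
          (fun Y hY hle => hHf' true Y hY hle) (2 * M) 1 none 0 (by omega)
        have hL2 := loopA_false piles i M (fun a j m => dfsA piles a j m (piles.length - i - 1))
          (fun Y hY hle => hHn true Y hY hle) (2 * M) 1 none 0 (by omega)
        rw [Fv, hn]
        simp [dfsA, hne, hL1, hL2]

theorem F_true_char (piles : List Int) (i M : Nat) (hi : i < piles.length) :
    Fv piles true i M = maxFold 0 (valsT piles i M 1 (min (2 * M) (piles.length - i))) := by
  have hn : piles.length - i = (piles.length - i - 1) + 1 := by omega
  have hne : ¬ i = piles.length := by omega
  have hH : ∀ Y, 1 ≤ Y → i + Y ≤ piles.length →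
      dfsA piles false (i + Y) (max M Y) (piles.length - i - 1) = Fv piles false (i + Y) (max M Y) := by
    intro Y hY hle
    exact dfs_eq_F piles (piles.length) (i + Y) (by omega) false (max M Y) _ (by omega)
  have hL := loopA_true piles i M (fun a j m => dfsA piles a j m (piles.length - i - 1))
    hH (2 * M) 1 0 (by omega)
  rw [show sufv piles i - sufv piles (i + 1 - 1) = 0 from by
        rw [show i + 1 - 1 = i from by omega]; ring] at hL
  have hmin : min (2 * M) (piles.length + 1 - (i + 1)) = min (2 * M) (piles.length - i) := by omega
  rw [hmin] at hL
  rw [Fv, hn]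
  simp [dfsA, hne, hL]
  rw [← hn]

theorem F_false_char (piles : List Int) (i M : Nat) (hi : i < piles.length) :
    Fv piles false i M = (optMin none (valsU piles i M 1 (min (2 * M) (piles.length - i)))).getD 0 := by
  have hn : piles.length - i = (piles.length - i - 1) + 1 := by omega
  have hne : ¬ i = piles.length := by omega
  have hH : ∀ Y, 1 ≤ Y → i + Y ≤ piles.length →
      dfsA piles true (i + Y) (max M Y) (piles.length - i - 1) = Fv piles true (i + Y) (max M Y) := by
    intro Y hY hle
    exact dfs_eq_F piles (piles.length) (i + Y) (by omega) true (max M Y) _ (by omega)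
  have hL := loopA_false piles i M (fun a j m => dfsA piles a j m (piles.length - i - 1))
    hH (2 * M) 1 none 0 (by omega)
  have hmin : min (2 * M) (piles.length + 1 - (i + 1)) = min (2 * M) (piles.length - i) := by omega
  rw [hmin] at hL
  rw [Fv, hn]
  simp [dfsA, hne, hL]
  rw [← hn]

-- B-side row specifications
def rowT_spec (piles : List Int) (j : Nat) : List Int :=
  (List.range (piles.length + 1)).map (fun M => Fv piles true j M)

def rowU_spec (piles : List Int) (j : Nat) : List Int :=
  (List.range (piles.length + 1)).map (fun M => Fv piles false j M)

theorem foldl_pair (f g : Nat → Int) :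
    ∀ (l : List Nat) (b : Int) (w : Option Int),
      l.foldl (fun bw X => (max bw.1 (f X),
          some (match bw.2 with | none => g X | some c => min c (g X)))) (b, w)
        = (maxFold b (l.map f), optMin w (l.map g)) := by
  intro l
  induction l with
  | nil => intro b w; simp [maxFold, optMin]
  | cons x xs ih => intro b w; simp [maxFold, optMin, ih] at *

theorem rowT_spec_base (piles : List Int) :
    rowT_spec piles piles.length = List.replicate (piles.length + 1) 0 ∧
    rowU_spec piles piles.length = List.replicate (piles.length + 1) 0 := by
  constructor <;>
  · simp only [rowT_spec, rowU_spec]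
    rw [List.eq_replicate_iff]
    refine ⟨by simp, ?_⟩
    intro b hb
    simp only [List.mem_map] at hb
    obtain ⟨M, _, rfl⟩ := hb
    simp [Fv, dfsA]

theorem innerB_eval (piles : List Int) (i M : Nat) (hi : i < piles.length) (hM : M ≤ piles.length)
    (n : Nat) (hn : n = piles.length) :
    innerB (sufB piles) ((List.range' (i + 1) (n - i)).map (rowT_spec piles))
        ((List.range' (i + 1) (n - i)).map (rowU_spec piles)) n i M
      = (Fv piles true i M, optMin none (valsU piles i M 1 (min (2 * M) (n - i)))) := by
  subst hn
  set n := piles.length with hn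
  have hmem : ∀ X ∈ List.range' 1 (min (2 * M) (n - i)), 1 ≤ X ∧ X ≤ n - i := by
    intro X hX
    rw [List.mem_range'_1] at hX
    omega
  -- evaluate the fold via foldl_pair with the concrete f, g
  have hsplit := foldl_pair
    (fun X => (sufB piles).getD i 0 - (sufB piles).getD (i + X) 0
        + ((((List.range' (i + 1) (n - i)).map (rowU_spec piles)).getD (X - 1) []).getD (max M X) 0))
    (fun X => (((List.range' (i + 1) (n - i)).map (rowT_spec piles)).getD (X - 1) []).getD (max M X) 0)
    (List.range' 1 (min (2 * M) (n - i))) 0 none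
  have hun : innerB (sufB piles) ((List.range' (i + 1) (n - i)).map (rowT_spec piles))
      ((List.range' (i + 1) (n - i)).map (rowU_spec piles)) n i M
      = (maxFold 0 ((List.range' 1 (min (2 * M) (n - i))).map
          (fun X => (sufB piles).getD i 0 - (sufB piles).getD (i + X) 0
            + ((((List.range' (i + 1) (n - i)).map (rowU_spec piles)).getD (X - 1) []).getD (max M X) 0))),
        optMin none ((List.range' 1 (min (2 * M) (n - i))).map
          (fun X => (((List.range' (i + 1) (n - i)).map (rowT_spec piles)).getD (X - 1) []).getD (max M X) 0))) := by
    rw [innerB, ← hsplit]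
  rw [hun, Prod.mk.injEq]
  have hrowU : ∀ X, 1 ≤ X → X ≤ n - i →
      (((List.range' (i + 1) (n - i)).map (rowU_spec piles)).getD (X - 1) []).getD (max M X) 0
        = Fv piles false (i + X) (max M X) := by
    intro X h1 h2
    have hlen : X - 1 < ((List.range' (i + 1) (n - i)).map (rowU_spec piles)).length := by
      simp; omega
    rw [List.getD_eq_getElem _ _ hlen]
    have hlen2 : X - 1 < (List.range' (i + 1) (n - i)).length := by simp; omega
    simp only [List.getElem_map, List.getElem_range']
    rw [show i + 1 + 1 * (X - 1) = i + X from by omega, rowU_spec]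
    have hMp : max M X < n + 1 := by omega
    have hlen3 : max M X < ((List.range (n + 1)).map (fun M => Fv piles false (i + X) M)).length := by
      simp; omega
    rw [List.getD_eq_getElem _ _ hlen3]
    simp [List.getElem_range]
  have hrowT : ∀ X, 1 ≤ X → X ≤ n - i →
      (((List.range' (i + 1) (n - i)).map (rowT_spec piles)).getD (X - 1) []).getD (max M X) 0
        = Fv piles true (i + X) (max M X) := by
    intro X h1 h2
    have hlen : X - 1 < ((List.range' (i + 1) (n - i)).map (rowT_spec piles)).length := by
      simp; omega
    rw [List.getD_eq_getElem _ _ hlen]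
    have hlen2 : X - 1 < (List.range' (i + 1) (n - i)).length := by simp; omega
    simp only [List.getElem_map, List.getElem_range']
    rw [show i + 1 + 1 * (X - 1) = i + X from by omega, rowT_spec]
    have hMp : max M X < n + 1 := by omega
    have hlen3 : max M X < ((List.range (n + 1)).map (fun M => Fv piles true (i + X) M)).length := by
      simp; omega
    rw [List.getD_eq_getElem _ _ hlen3]
    simp [List.getElem_range]
  refine ⟨?_, ?_⟩
  · rw [F_true_char piles i M hi]
    congr 1
    rw [valsT]
    apply List.map_congr_left
    intro X hX
    obtain ⟨h1, h2⟩ := hmem X hX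
    rw [hrowU X h1 h2, sufB_getD, sufB_getD]
  · congr 1
    rw [valsU]
    apply List.map_congr_left
    intro X hX
    obtain ⟨h1, h2⟩ := hmem X hX
    exact hrowT X h1 h2

theorem rows_inv (piles : List Int) :
    ∀ k j, j + k = piles.length →
      (List.range' j k).foldr (stepB (sufB piles) piles.length)
          ([List.replicate (piles.length + 1) 0], [List.replicate (piles.length + 1) 0])
        = ((List.range' j (k + 1)).map (rowT_spec piles),
           (List.range' j (k + 1)).map (rowU_spec piles)) := by
  intro k
  induction k with
  | zero =>
    intro j hj
    obtain ⟨hT, hU⟩ := rowT_spec_base piles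
    have hj' : j = piles.length := by omega
    subst hj'
    simp [hT, hU]
  | succ k ih =>
    intro j hj
    have hj' : j + 1 + k = piles.length := by omega
    have hrec := ih (j + 1) hj'
    rw [List.range'_succ, List.foldr_cons, hrec]
    have hjlt : j < piles.length := by omega
    simp only [stepB]
    have hrow : ∀ M ∈ List.range (piles.length + 1),
        innerB (sufB piles) ((List.range' (j + 1) (k + 1)).map (rowT_spec piles))
            ((List.range' (j + 1) (k + 1)).map (rowU_spec piles)) piles.length j M
          = (Fv piles true j M, optMin none (valsU piles j M 1 (min (2 * M) (piles.length - j)))) := by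
      intro M hM
      rw [List.mem_range] at hM
      have hk1 : k + 1 = piles.length - j := by omega
      rw [hk1]
      exact innerB_eval piles j M hjlt (by omega) piles.length rfl
    have hsplit : List.range' j (k + 1 + 1) = j :: List.range' (j + 1) (k + 1) := by
      rw [List.range'_succ]
    rw [hsplit, List.map_cons, List.map_cons, Prod.mk.injEq]
    refine ⟨?_, ?_⟩
    · congr 1
      rw [List.map_map, rowT_spec]
      apply List.map_congr_left
      intro M hM
      simp only [Function.comp_apply]
      rw [hrow M hM]
    · congr 1
      rw [List.map_map, rowU_spec]
      apply List.map_congr_left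
      intro M hM
      simp only [Function.comp_apply]
      rw [hrow M hM]
      simp [F_false_char piles j M hjlt]

-- ===== VERDICT (by name: the statement is the Claim_ definition above) =====
theorem solve_spec : Claim_equal_solve := by
  intro piles _
  unfold Spec_solve
  by_cases hn : piles.length = 0
  · have : solve piles = 0 := by
      simp [solve, dfsA, hn]
    rw [this, solve_alt]
    simp [hn]
  · have hpos : 0 < piles.length := Nat.pos_of_ne_zero hn
    have hrows := rows_inv piles piles.length 0 (by omega)
    rw [solve_alt]
    simp only [if_neg hn]
    rw [List.range_eq_range', hrows]
    have hne : (List.range' 0 (piles.length + 1)).map (rowT_spec piles) ≠ [] := by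
      simp
    have hhead : ((List.range' 0 (piles.length + 1)).map (rowT_spec piles)).getD 0 []
        = rowT_spec piles 0 := by
      have hlen : 0 < ((List.range' 0 (piles.length + 1)).map (rowT_spec piles)).length := by
        simp
      rw [List.getD_eq_getElem _ _ hlen]
      simp [List.getElem_range']
    rw [hhead]
    have h1 : (rowT_spec piles 0).getD 1 0 = Fv piles true 0 1 := by
      have hlen : 1 < ((List.range (piles.length + 1)).map (fun M => Fv piles true 0 M)).length := by
        simp; omega
      rw [rowT_spec, List.getD_eq_getElem _ _ hlen]
      simp [List.getElem_range]
    rw [h1, solve]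
    exact dfs_eq_F piles piles.length 0 (by omega) true 1 (piles.length + 1) (by omega)
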